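-- pv_equiv track=rewrite | github.com/Jay1Jung/Battleship-PPO-Agent | rules.py | contiguous_length
-- ===== SOURCE A (Python) =====
-- def contiguous_length(cluster):
--     if not cluster: return 0
--     rows = {r for r,_ in cluster}
--     cols = {c for _,c in cluster}
--     if len(rows)==1:
--         cs = sorted(c for _,c in cluster); return cs[-1]-cs[0]+1
--     if len(cols)==1:
--         rs = sorted(r for r,_ in cluster); return rs[-1]-rs[0]+1
--     return 0
-- ===== SOURCE B (Python) =====
-- def contiguous_length(cluster):
--     if not cluster:
--         return 0
--     (r0, c0) = cluster[0]
--     rmin = rmax = r0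
--     cmin = cmax = c0
--     for r, c in cluster[1:]:
--         if r < rmin: rmin = r
--         if r > rmax: rmax = r
--         if c < cmin: cmin = c
--         if c > cmax: cmax = c
--     if rmin == rmax:
--         return cmax - cmin + 1
--     if cmin == cmax:
--         return rmax - rmin + 1
--     return 0
-- ===== Notes on version B (the rewrite author's own statement) =====
-- stated objective: simpler
-- what changed: Replaces the two set constructions plus sort-to-read-off-extremes with a single pass that tracks running min/max of rows and columns and decides orientation by comparing those extremes.
import Mathlib
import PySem

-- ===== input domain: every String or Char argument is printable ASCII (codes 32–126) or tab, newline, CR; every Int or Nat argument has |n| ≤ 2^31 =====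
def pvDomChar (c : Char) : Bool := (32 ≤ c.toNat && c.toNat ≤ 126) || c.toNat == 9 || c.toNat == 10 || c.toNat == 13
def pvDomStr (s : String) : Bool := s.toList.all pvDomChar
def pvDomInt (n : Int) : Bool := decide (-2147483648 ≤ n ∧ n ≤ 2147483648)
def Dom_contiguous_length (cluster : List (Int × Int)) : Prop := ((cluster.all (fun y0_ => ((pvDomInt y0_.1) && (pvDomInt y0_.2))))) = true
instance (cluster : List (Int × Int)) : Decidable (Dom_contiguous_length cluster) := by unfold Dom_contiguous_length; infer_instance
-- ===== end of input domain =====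

-- B replaces A's set constructions and sort with a single running min/max pass over the cells.

-- ===== PORT A =====
-- sets {r for r,_ in cluster} / {c for _,c in cluster} → PySem.Set.ofList; sorted(...) → PySem.List.sorted;
-- cs[-1] / cs[0] → pyGetD (in range: cs is nonempty since cluster is nonempty in those branches, so exact).
def contiguous_length (cluster : List (Int × Int)) : Int :=
  if cluster = [] then 0
  else
    let rows := PySem.Set.ofList (cluster.map Prod.fst)
    let cols := PySem.Set.ofList (cluster.map Prod.snd)
    if rows.length = 1 then
      let cs := PySem.List.sorted (cluster.map Prod.snd) (fun x => x) false
      PySem.List.pyGetD cs (-1) 0 - PySem.List.pyGetD cs 0 0 + 1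
    else if cols.length = 1 then
      let rs := PySem.List.sorted (cluster.map Prod.fst) (fun x => x) false
      PySem.List.pyGetD rs (-1) 0 - PySem.List.pyGetD rs 0 0 + 1
    else 0

-- ===== PORT B =====
-- the loop body: update the four running extremes with one cell
def clAltStep (acc : Int × Int × Int × Int) (p : Int × Int) : Int × Int × Int × Int :=
  let rmin := if p.1 < acc.1 then p.1 else acc.1
  let rmax := if p.1 > acc.2.1 then p.1 else acc.2.1
  let cmin := if p.2 < acc.2.2.1 then p.2 else acc.2.2.1
  let cmax := if p.2 > acc.2.2.2 then p.2 else acc.2.2.2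
  (rmin, rmax, cmin, cmax)

def contiguous_length_alt (cluster : List (Int × Int)) : Int :=
  match cluster with
  | [] => 0
  | (r0, c0) :: rest =>
    let s := rest.foldl clAltStep (r0, r0, c0, c0)
    if s.1 = s.2.1 then s.2.2.2 - s.2.2.1 + 1
    else if s.2.2.1 = s.2.2.2 then s.2.1 - s.1 + 1
    else 0

-- ===== PRECONDITION & SPEC =====
def Spec_contiguous_length (cluster : List (Int × Int)) (out : Int) : Prop := out = contiguous_length_alt cluster
instance (cluster : List (Int × Int)) (out : Int) : Decidable (Spec_contiguous_length cluster out) := by unfold Spec_contiguous_length; infer_instance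

-- ===== CLAIM (what is proved, stated in full; the proofs are below) =====
def Claim_equal_contiguous_length : Prop := ∀ (cluster : List (Int × Int)), Dom_contiguous_length cluster → Spec_contiguous_length cluster (contiguous_length cluster)

-- ===== LEMMAS AND PROOFS =====

-- the four-component fold is the componentwise running min/max folds
theorem cl_fold_eq (rest : List (Int × Int)) (a b c d : Int) :
    rest.foldl clAltStep (a, b, c, d) =
      ((rest.map Prod.fst).foldl min a, (rest.map Prod.fst).foldl max b,
       (rest.map Prod.snd).foldl min c, (rest.map Prod.snd).foldl max d) := by
  induction rest generalizing a b c d with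
  | nil => rfl
  | cons p t ih =>
      have h1 : (if p.1 < a then p.1 else a) = min a p.1 := by simp [min_def]; omega
      have h2 : (if p.1 > b then p.1 else b) = max b p.1 := by simp [max_def]; omega
      have h3 : (if p.2 < c then p.2 else c) = min c p.2 := by simp [min_def]; omega
      have h4 : (if p.2 > d then p.2 else d) = max d p.2 := by simp [max_def]; omega
      simp only [List.foldl_cons, List.map_cons, clAltStep, ih, h1, h2, h3, h4]

theorem foldl_min_mem (a : Int) (l : List Int) : l.foldl min a ∈ a :: l := by
  induction l generalizing a with
  | nil => simp
  | cons x t ih =>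
    have h := ih (min a x)
    rcases List.mem_cons.1 h with h | h
    · rcases min_choice a x with hc | hc <;> rw [List.foldl_cons, h, hc] <;> simp
    · exact List.mem_cons_of_mem _ (List.mem_cons_of_mem _ h)

theorem foldl_min_le (a : Int) (l : List Int) : ∀ y ∈ a :: l, l.foldl min a ≤ y := by
  induction l generalizing a with
  | nil => intro y hy; simp at hy ⊢; omega
  | cons x t ih =>
    intro y hy
    have hinit := ih (min a x) (min a x) (by simp)
    rcases List.mem_cons.1 hy with rfl | hy
    · exact le_trans hinit (min_le_left _ _)
    · rcases List.mem_cons.1 hy with rfl | hy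
      · exact le_trans hinit (min_le_right _ _)
      · exact ih (min a x) y (by simp [hy])

theorem foldl_max_mem (a : Int) (l : List Int) : l.foldl max a ∈ a :: l := by
  induction l generalizing a with
  | nil => simp
  | cons x t ih =>
    have h := ih (max a x)
    rcases List.mem_cons.1 h with h | h
    · rcases max_choice a x with hc | hc <;> rw [List.foldl_cons, h, hc] <;> simp
    · exact List.mem_cons_of_mem _ (List.mem_cons_of_mem _ h)

theorem foldl_max_ge (a : Int) (l : List Int) : ∀ y ∈ a :: l, y ≤ l.foldl max a := by
  induction l generalizing a with
  | nil => intro y hy; simp at hy ⊢; omega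
  | cons x t ih =>
    intro y hy
    have hinit := ih (max a x) (max a x) (by simp)
    rcases List.mem_cons.1 hy with rfl | hy
    · exact le_trans (le_max_left _ _) hinit
    · rcases List.mem_cons.1 hy with rfl | hy
      · exact le_trans (le_max_right _ _) hinit
      · exact ih (max a x) y (by simp [hy])

-- set-of-list has one element iff everything equals the head
theorem set_len_one_iff (x : Int) (xs : List Int) :
    (PySem.Set.ofList (x :: xs)).length = 1 ↔ ∀ y ∈ xs, y = x := by
  have hmem := fun y => PySem.Set.mem_ofList (x :: xs) y
  have hnd := PySem.Set.nodup_ofList (x :: xs)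
  constructor
  · intro hlen y hy
    obtain ⟨a, ha⟩ : ∃ a, PySem.Set.ofList (x :: xs) = [a] := by
      match h : PySem.Set.ofList (x :: xs) with
      | [a] => exact ⟨a, rfl⟩
      | [] => rw [h] at hlen; simp at hlen
      | a :: b :: t => rw [h] at hlen; simp at hlen
    have hax : a = x := by
      have := (hmem x).2 (by simp)
      rw [ha] at this; exact (List.mem_singleton.1 this).symm
    have := (hmem y).2 (by simp [hy])
    rw [ha, hax] at this; simpa using this
  · intro hall
    have hsub : ∀ b ∈ PySem.Set.ofList (x :: xs), b = x := by
      intro b hb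
      have := (hmem b).1 hb
      rcases List.mem_cons.1 this with rfl | hb' 
      · rfl
      · exact hall b hb'
    match h : PySem.Set.ofList (x :: xs) with
    | [] =>
        have := (hmem x).2 (by simp)
        rw [h] at this; simp at this
    | [a] => rfl
    | a :: b :: t =>
        rw [h] at hsub hnd
        have ha := hsub a (by simp)
        have hb := hsub b (by simp)
        subst ha hb
        simp at hnd

-- "all of xs equal a" is the same as "running min equals running max"
theorem all_eq_iff_min_eq_max (a : Int) (l : List Int) :
    (∀ y ∈ l, y = a) ↔ l.foldl min a = l.foldl max a := by
  constructor
  · intro hall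
    have h1 : l.foldl min a = a := by
      have hm := foldl_min_mem a l
      rcases List.mem_cons.1 hm with h | h
      · exact h
      · exact hall _ h
    have h2 : l.foldl max a = a := by
      have hm := foldl_max_mem a l
      rcases List.mem_cons.1 hm with h | h
      · exact h
      · exact hall _ h
    rw [h1, h2]
  · intro heq y hy
    have h1 := foldl_min_le a l y (by simp [hy])
    have h2 := foldl_max_ge a l y (by simp [hy])
    have h3 := foldl_min_le a l a (by simp)
    have h4 := foldl_max_ge a l a (by simp)
    omega

-- the head and last of sorted(a :: l) are the running min and max
theorem sorted_head_eq_foldl_min (a : Int) (l : List Int) :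
    PySem.List.pyGetD (PySem.List.sorted (a :: l) (fun x => x) false) 0 0 = l.foldl min a := by
  match h : PySem.List.sorted (a :: l) (fun x => x) false with
  | [] => exact absurd ((PySem.List.sorted_eq_nil_iff _ _ _).1 h) (by simp)
  | m :: t =>
    rw [PySem.List.pyGetD_zero_cons]
    have hle : ∀ y ∈ a :: l, m ≤ y := by simpa using PySem.List.key_head_sorted_le (a :: l) (fun x : Int => x) h
    have hmem : m ∈ a :: l := by
      rw [← PySem.List.mem_sorted (key := fun x => x) (rev := false), h]; simp
    have h1 := foldl_min_le a l m hmem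
    have h2 := hle _ (foldl_min_mem a l)
    omega

theorem sorted_last_eq_foldl_max (a : Int) (l : List Int) :
    PySem.List.pyGetD (PySem.List.sorted (a :: l) (fun x => x) false) (-1) 0 = l.foldl max a := by
  have hne : PySem.List.sorted (a :: l) (fun x => x) false ≠ [] := by
    rw [Ne, PySem.List.sorted_eq_nil_iff]; simp
  rw [PySem.List.pyGetD_neg_one (h := hne)]
  have hpw : (PySem.List.sorted (a :: l) (fun x => x) false).Pairwise (fun p q => p ≤ q) := by
    simpa using PySem.List.sorted_pairwise (a :: l) (fun x => x)
  have hgmem : (PySem.List.sorted (a :: l) (fun x => x) false).getLast hne ∈ a :: l := by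
    rw [← PySem.List.mem_sorted (key := fun x => x) (rev := false)]
    exact List.getLast_mem hne
  have h2 : (PySem.List.sorted (a :: l) (fun x => x) false).getLast hne ≤ l.foldl max a :=
    foldl_max_ge a l ((PySem.List.sorted (a :: l) (fun x => x) false).getLast hne) hgmem
  have hmem2 : l.foldl max a ∈ PySem.List.sorted (a :: l) (fun x => x) false := by
    rw [PySem.List.mem_sorted]; exact foldl_max_mem a l
  have h3 := hpw.rel_getLast hmem2
  omega

-- ===== VERDICT (by name: the statement is the Claim_ definition above) =====
theorem contiguous_length_spec : Claim_equal_contiguous_length := by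
  unfold Claim_equal_contiguous_length
  intro cluster _
  unfold Spec_contiguous_length
  match cluster with
  | [] => rfl
  | (r0, c0) :: rest =>
    simp only [contiguous_length, contiguous_length_alt, cl_fold_eq, if_neg (List.cons_ne_nil _ _),
      List.map_cons]
    have hr := (set_len_one_iff r0 (rest.map Prod.fst)).trans
      (all_eq_iff_min_eq_max r0 (rest.map Prod.fst))
    have hc := (set_len_one_iff c0 (rest.map Prod.snd)).trans
      (all_eq_iff_min_eq_max c0 (rest.map Prod.snd))
    by_cases h1 : (rest.map Prod.fst).foldl min r0 = (rest.map Prod.fst).foldl max r0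
    · rw [if_pos (hr.2 h1), if_pos h1,
        sorted_head_eq_foldl_min c0 (rest.map Prod.snd),
        sorted_last_eq_foldl_max c0 (rest.map Prod.snd)]
    · rw [if_neg (fun hh => h1 (hr.1 hh)), if_neg h1]
      by_cases h2 : (rest.map Prod.snd).foldl min c0 = (rest.map Prod.snd).foldl max c0
      · rw [if_pos (hc.2 h2), if_pos h2,
          sorted_head_eq_foldl_min r0 (rest.map Prod.fst),
          sorted_last_eq_foldl_max r0 (rest.map Prod.fst)]
      · rw [if_neg (fun hh => h2 (hc.1 hh)), if_neg h2]
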